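-- pv_equiv track=rewrite | github.com/thepratholic/Competitive-Programming | LeetCode/Biweekly Contest 177/Smallest Pair With Different Frequencies.py | minDistinctFreqPair
-- ===== SOURCE A (Python) =====
-- from typing import Counter, DefaultDict
--
-- def minDistinctFreqPair(nums: list[int]) -> list[int]:
--     n = len(nums)
--     freq = Counter(nums)
--
--     ans = [-1, -1]
--
--     if len(set(freq.values())) < 2:
--         return ans
--
--
--     mpp = DefaultDict(list)
--
--     for k, v in freq.items():
--         mpp[v].append(k)
--
--     for f in mpp:
--         mpp[f].sort()
--
--     vals = sorted(freq.keys())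
--     for i in range(len(vals)):
--         for j in range(i + 1, len(vals)):
--             if freq[vals[i]] != freq[vals[j]]:
--                 return [vals[i], vals[j]]
--
--     return ans
-- ===== SOURCE B (Python) =====
-- def minDistinctFreqPair(nums: list[int]) -> list[int]:
--     freq = {}
--     for x in nums:
--         freq[x] = freq.get(x, 0) + 1
--     if len(set(freq.values())) < 2:
--         return [-1, -1]
--     a = min(freq)
--     base = freq[a]
--     b = min(v for v in freq if freq[v] != base)
--     return [a, b]
-- ===== Notes on version B (the rewrite author's own statement) =====
-- stated objective: simpler
-- what changed: Replaces A's dead value-grouping dict and the sort-then-nested-scan over sorted values by two linear minimum scans over the counter's keys (min key, then min key with a different count), with no sort.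
import Mathlib
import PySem

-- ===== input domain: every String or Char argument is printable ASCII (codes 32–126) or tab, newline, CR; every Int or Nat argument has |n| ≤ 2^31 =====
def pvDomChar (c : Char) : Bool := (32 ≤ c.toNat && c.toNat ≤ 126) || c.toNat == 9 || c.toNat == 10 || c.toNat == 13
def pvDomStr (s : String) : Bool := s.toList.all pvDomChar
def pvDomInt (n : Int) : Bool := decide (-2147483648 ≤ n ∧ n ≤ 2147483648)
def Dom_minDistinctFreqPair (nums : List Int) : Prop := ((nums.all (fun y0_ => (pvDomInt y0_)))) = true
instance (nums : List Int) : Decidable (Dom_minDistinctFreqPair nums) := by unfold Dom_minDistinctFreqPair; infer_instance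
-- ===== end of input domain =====

-- B replaces A's sorted-values nested scan (plus a dead grouping dict) by two linear
-- minimum scans over the counter's keys; objective: simpler, no sort.

-- ===== PORT A =====
-- inner 'for j in range(i+1, len(vals)): if freq[vals[i]] != freq[vals[j]]: return [vals[i], vals[j]]'
def pvAInner (freq : PySem.Dict Int Int) (vals : List Int) (vi : Int) : List Int → Option (List Int)
  | [] => none
  | j :: js =>
    if freq.getD vi 0 ≠ freq.getD (PySem.List.pyGetD vals j 0) 0 then
      some [vi, PySem.List.pyGetD vals j 0]
    else pvAInner freq vals vi js

-- outer 'for i in range(len(vals)): …' with the early return threaded as an Option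
def pvAOuter (freq : PySem.Dict Int Int) (vals : List Int) : List Int → Option (List Int)
  | [] => none
  | i :: is0 =>
    match pvAInner freq vals (PySem.List.pyGetD vals i 0) (PySem.List.pyRange (i + 1) vals.length 1) with
    | some r => some r
    | none => pvAOuter freq vals is0

def minDistinctFreqPair (nums : List Int) : List Int :=
  let _n := nums.length
  let freq := PySem.Dict.counter nums
  let ans : List Int := [-1, -1]
  if (PySem.Set.ofList freq.values).length < 2 then ans
  else
    -- dead code in A, kept: mpp = DefaultDict(list); grouping, then sorting each group
    let mpp := freq.items.foldl (fun d p => d.modify p.2 [] (· ++ [p.1]))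
      (PySem.Dict.empty : PySem.Dict Int (List Int))
    let _mpp := mpp.keys.foldl (fun d f => d.modify f [] (fun l => PySem.List.sorted l (fun x => x) false)) mpp
    let vals := PySem.List.sorted freq.keys (fun x => x) false
    match pvAOuter freq vals (PySem.List.pyRange 0 vals.length 1) with
    | some r => r
    | none => ans

-- ===== PORT B =====
def minDistinctFreqPair_alt (nums : List Int) : List Int :=
  let freq := nums.foldl (fun d x => d.insert x (d.getD x 0 + 1)) (PySem.Dict.empty : PySem.Dict Int Int)
  if (PySem.Set.ofList freq.values).length < 2 then [-1, -1]
  else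
    match PySem.List.min? freq.keys (fun x => x) with
    | none => [-1, -1]  -- unreachable: past the guard freq has ≥ 2 keys
    | some a =>
      let base := freq.getD a 0
      match PySem.List.min? (freq.keys.filter (fun v => decide (freq.getD v 0 ≠ base))) (fun x => x) with
      | none => [-1, -1]  -- unreachable: past the guard some key has a count ≠ base
      | some b => [a, b]

-- ===== PRECONDITION & SPEC =====
def Spec_minDistinctFreqPair (nums : List Int) (out : List Int) : Prop := out = minDistinctFreqPair_alt nums
instance (nums : List Int) (out : List Int) : Decidable (Spec_minDistinctFreqPair nums out) := by unfold Spec_minDistinctFreqPair; infer_instance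

-- ===== CLAIM (what is proved, stated in full; the proofs are below) =====
def Claim_equal_minDistinctFreqPair : Prop := ∀ (nums : List Int), Dom_minDistinctFreqPair nums → Spec_minDistinctFreqPair nums (minDistinctFreqPair nums)

-- ===== LEMMAS AND PROOFS =====

-- the inner loop over indices k, k+1, … is a structural scan of the suffix vals.drop k
def pvScan (freq : PySem.Dict Int Int) (vi : Int) : List Int → Option (List Int)
  | [] => none
  | v :: rest => if freq.getD vi 0 ≠ freq.getD v 0 then some [vi, v] else pvScan freq vi rest

theorem pvAInner_range (freq : PySem.Dict Int Int) (vi : Int) (xs : List Int) (k : Nat) :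
    pvAInner freq xs vi (PySem.List.pyRange (k : Int) xs.length 1) = pvScan freq vi (xs.drop k) := by
  by_cases h : k < xs.length
  · have hlt : (k : Int) < (xs.length : Int) := by exact_mod_cast h
    rw [PySem.List.pyRange_one_cons hlt]
    have hget : PySem.List.pyGetD xs (k : Int) 0 = xs.getD k 0 := PySem.List.pyGetD_natCast xs k 0
    have hdrop : xs.drop k = xs[k] :: xs.drop (k + 1) := List.drop_eq_getElem_cons h
    have hgd : xs.getD k 0 = xs[k] := by simp [List.getD, h]
    have hcast : (k : Int) + 1 = ((k + 1 : Nat) : Int) := by push_cast; ring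
    simp only [pvAInner, hget, hgd, hdrop, hcast, pvScan]
    by_cases hp : freq.getD vi 0 ≠ freq.getD xs[k] 0
    · simp [hp]
    · simp only [if_neg hp]
      exact pvAInner_range freq vi xs (k + 1)
  · have hge : (xs.length : Int) ≤ (k : Int) := by exact_mod_cast Nat.le_of_not_lt h
    have h1 : PySem.List.pyRange (k : Int) xs.length 1 = [] := by
      have : ∀ x, x ∉ PySem.List.pyRange (k : Int) xs.length 1 := by
        intro x hx
        have := (PySem.List.mem_pyRange_one).mp hx
        omega
      exact List.eq_nil_iff_forall_not_mem.mpr this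
    have h2 : xs.drop k = [] := List.drop_eq_nil_of_le (Nat.le_of_not_lt h)
    rw [h1, h2]; rfl
termination_by xs.length - k

-- a strictly increasing list is scanned front to back: the first hit is the least hit
theorem pvScan_min (freq : PySem.Dict Int Int) (vi b : Int) :
    ∀ (t : List Int), t.Pairwise (· < ·) → b ∈ t → freq.getD vi 0 ≠ freq.getD b 0 →
      (∀ y ∈ t, freq.getD vi 0 ≠ freq.getD y 0 → b ≤ y) →
      pvScan freq vi t = some [vi, b] := by
  intro t
  induction t with
  | nil => intro _ hb; cases hb
  | cons v rest ih =>
    intro hpw hb hpb hmin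
    by_cases hp : freq.getD vi 0 ≠ freq.getD v 0
    · have hvb : v = b := by
        rcases List.mem_cons.mp hb with h | h
        · exact h.symm
        · have h1 : v < b := (List.pairwise_cons.mp hpw).1 b h
          have h2 : b ≤ v := hmin v (List.mem_cons_self) hp
          omega
      subst hvb
      simp [pvScan, hp]
    · have hbrest : b ∈ rest := by
        rcases List.mem_cons.mp hb with h | h
        · exact absurd (h ▸ hpb) hp
        · exact h
      simp only [pvScan, if_neg hp]
      exact ih (List.pairwise_cons.mp hpw).2 hbrest hpb
        (fun y hy hpy => hmin y (List.mem_cons_of_mem v hy) hpy)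

theorem minDistinctFreqPair_spec' (nums : List Int) :
    minDistinctFreqPair nums = minDistinctFreqPair_alt nums := by
  unfold minDistinctFreqPair minDistinctFreqPair_alt
  rw [PySem.Dict.foldl_insert_getD_add_one_eq_counter]
  set c := PySem.Dict.counter nums with hc
  by_cases hg : (PySem.Set.ofList c.values).length < 2
  · simp [hg]
  · simp only [if_neg hg]
    have hnodup : c.keys.Nodup := PySem.Dict.nodup_keys_counter nums
    -- two keys with different counts
    have hvals2 : 2 ≤ (PySem.Set.ofList c.values).length := Nat.le_of_not_lt hg
    obtain ⟨w1, hw1, w2, hw2, hww⟩ :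
        ∃ w1 ∈ c.values, ∃ w2 ∈ c.values, w1 ≠ w2 := by
      rcases hS : PySem.Set.ofList c.values with _ | ⟨x, _ | ⟨y, r⟩⟩
      · rw [hS] at hvals2; simp at hvals2
      · rw [hS] at hvals2; simp at hvals2
      · have hnd := PySem.Set.nodup_ofList c.values
        rw [hS] at hnd
        have hxy : x ≠ y := by
          have := List.pairwise_cons.mp hnd
          exact this.1 y (List.mem_cons_self)
        refine ⟨x, ?_, y, ?_, hxy⟩
        · rw [← PySem.Set.mem_ofList, hS]; simp
        · rw [← PySem.Set.mem_ofList, hS]; simp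
    have hvmap := PySem.Dict.values_eq_map_keys c hnodup 0
    obtain ⟨k1, hk1, hk1v⟩ := List.mem_map.mp (hvmap ▸ hw1)
    obtain ⟨k2, hk2, hk2v⟩ := List.mem_map.mp (hvmap ▸ hw2)
    -- the sorted key list
    set vals := PySem.List.sorted c.keys (fun x => x) false with hvals
    have hperm : vals.Perm c.keys := PySem.List.sorted_perm c.keys (fun x => x) false
    have hpairLe : vals.Pairwise (· ≤ ·) := by
      simpa using PySem.List.sorted_pairwise c.keys (fun x => x)
    have hvnodup : vals.Nodup := hperm.nodup_iff.mpr hnodup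
    have hlt : vals.Pairwise (· < ·) :=
      (hpairLe.and hvnodup).imp (fun h => lt_of_le_of_ne h.1 h.2)
    have hk1v' : k1 ∈ vals := hperm.mem_iff.mpr hk1
    obtain ⟨v0, t, hvt⟩ : ∃ v0 t, vals = v0 :: t := by
      cases hvt : vals with
      | nil => rw [hvt] at hk1v'; cases hk1v'
      | cons a b => exact ⟨a, b, rfl⟩
    have hhead : ∀ y ∈ c.keys, v0 ≤ y := by
      intro y hy
      exact PySem.List.key_head_sorted_le c.keys (fun x => x) (hvals ▸ hvt) y hy
    have hv0keys : v0 ∈ c.keys := hperm.mem_iff.mp (hvt ▸ List.mem_cons_self)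
    -- a witness key whose count differs from v0's
    obtain ⟨w, hwkeys, hwdiff⟩ : ∃ w ∈ c.keys, c.getD v0 0 ≠ c.getD w 0 := by
      by_cases h1 : c.getD v0 0 = c.getD k1 0
      · exact ⟨k2, hk2, by rw [h1, hk1v, hk2v]; exact hww⟩
      · exact ⟨k1, hk1, h1⟩
    -- B side: min of keys is v0
    have hkeysne : c.keys ≠ [] := by intro h; rw [h] at hv0keys; cases hv0keys
    obtain ⟨a, ha⟩ : ∃ a, PySem.List.min? c.keys (fun x => x) = some a := by
      cases h : PySem.List.min? c.keys (fun x => x) with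
      | none => exact absurd ((PySem.List.min?_eq_none_iff c.keys _).mp h) hkeysne
      | some a => exact ⟨a, rfl⟩
    have hamem : a ∈ c.keys := PySem.List.min?_mem ha
    have hav0 : a = v0 := le_antisymm (PySem.List.min?_isMin ha v0 hv0keys) (hhead a hamem)
    -- B side: min of the differing keys
    set flt := c.keys.filter (fun v => decide (c.getD v 0 ≠ c.getD v0 0)) with hflt
    have hfltne : flt ≠ [] := by
      have : w ∈ flt := by
        rw [hflt]; exact List.mem_filter.mpr ⟨hwkeys, by simpa using fun h => hwdiff h.symm⟩
      intro h; rw [h] at this; cases this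
    obtain ⟨b, hb⟩ : ∃ b, PySem.List.min? flt (fun x => x) = some b := by
      cases h : PySem.List.min? flt (fun x => x) with
      | none => exact absurd ((PySem.List.min?_eq_none_iff flt _).mp h) hfltne
      | some b => exact ⟨b, rfl⟩
    have hbmem : b ∈ flt := PySem.List.min?_mem hb
    have hbkeys : b ∈ c.keys := (List.mem_filter.mp (hflt ▸ hbmem)).1
    have hbdiff : c.getD b 0 ≠ c.getD v0 0 := by
      have := (List.mem_filter.mp (hflt ▸ hbmem)).2; simpa using this
    have hbt : b ∈ t := by
      have hbin : b ∈ vals := hperm.mem_iff.mpr hbkeys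
      rw [hvt] at hbin
      rcases List.mem_cons.mp hbin with h | h
      · exact absurd (by rw [h] : c.getD b 0 = c.getD v0 0) hbdiff
      · exact h
    -- A side: outer loop fires on its first iteration, the inner scan of t finds b
    have hlen : 0 < (vals.length : Int) := by
      rw [hvt]; simp
    rw [PySem.List.pyRange_one_cons hlen]
    simp only [pvAOuter]
    have hget0 : PySem.List.pyGetD vals 0 0 = v0 := by
      rw [hvt]; exact PySem.List.pyGetD_natCast (v0 :: t) 0 0
    have hrange1 : (0 : Int) + 1 = ((1 : Nat) : Int) := by norm_num
    rw [hget0, hrange1, pvAInner_range c v0 vals 1]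
    have hdrop1 : vals.drop 1 = t := by rw [hvt]; rfl
    rw [hdrop1]
    have hscan : pvScan c v0 t = some [v0, b] := by
      apply pvScan_min c v0 b t (List.pairwise_cons.mp (hvt ▸ hlt)).2 hbt
        (fun h => hbdiff h.symm)
      intro y hy hpy
      have hykeys : y ∈ c.keys := hperm.mem_iff.mp (hvt ▸ List.mem_cons_of_mem v0 hy)
      have hyflt : y ∈ flt := by
        rw [hflt]; exact List.mem_filter.mpr ⟨hykeys, by simpa using fun h => hpy h.symm⟩
      exact PySem.List.min?_isMin hb y hyflt
    rw [hscan, ha, hav0]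
    show [v0, b] = (match PySem.List.min? flt (fun x => x) with | none => [-1, -1] | some b => [v0, b])
    rw [hb]

-- ===== VERDICT (by name: the statement is the Claim_ definition above) =====
theorem minDistinctFreqPair_spec : Claim_equal_minDistinctFreqPair := by
  intro nums _
  exact minDistinctFreqPair_spec' nums
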